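-- pv_equiv track=rewrite | github.com/serge-sans-paille/perf | perf/__main__.py | _common_metadata
-- ===== SOURCE A (Python) =====
-- def _common_metadata(metadatas):
--     if not metadatas:
--         return dict()
--
--     metadata = dict(metadatas[0])
--     for run_metadata in metadatas[1:]:
--         for key in set(metadata) - set(run_metadata):
--             del metadata[key]
--         for key in set(run_metadata) & set(metadata):
--             if run_metadata[key] != metadata[key]:
--                 del metadata[key]
--     return metadata
-- ===== SOURCE B (Python) =====
-- def _common_metadata(metadatas):
--     if not metadatas:
--         return dict()
--     rest = metadatas[1:]
--     return {k: v for k, v in dict(metadatas[0]).items()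
--             if all(k in run and run[k] == v for run in rest)}
-- ===== Notes on version B (the rewrite author's own statement) =====
-- stated objective: simpler
-- what changed: Replaces A's per-run mutation loop (set-difference and set-intersection key deletions on a shrinking dict) by a single dict comprehension that filters the first run's items, keeping (k, v) only when every later run maps k to v.
import Mathlib
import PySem

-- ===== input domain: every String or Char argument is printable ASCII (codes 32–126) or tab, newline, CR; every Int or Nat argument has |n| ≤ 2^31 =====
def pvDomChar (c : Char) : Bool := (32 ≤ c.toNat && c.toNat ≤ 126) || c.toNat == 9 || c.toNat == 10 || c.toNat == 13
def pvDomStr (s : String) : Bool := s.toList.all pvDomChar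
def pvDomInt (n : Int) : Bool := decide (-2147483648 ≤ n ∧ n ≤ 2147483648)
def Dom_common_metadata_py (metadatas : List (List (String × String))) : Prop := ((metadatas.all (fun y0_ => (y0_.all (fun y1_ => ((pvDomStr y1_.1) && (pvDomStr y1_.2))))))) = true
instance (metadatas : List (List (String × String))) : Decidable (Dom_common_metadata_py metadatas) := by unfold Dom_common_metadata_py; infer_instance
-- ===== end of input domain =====

-- B replaces A's per-run key-deletion loops by one filtering pass over the first dict's items (simpler; same result).

-- ===== PORT A =====
-- one iteration of A's outer loop: delete keys absent from run, then keys whose values differ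
-- (iterating a Python set to delete keys: the resulting dict does not depend on that order)
def pvAStep (metadata : PySem.Dict String String) (run : List (String × String)) : PySem.Dict String String :=
  let rd := PySem.Dict.ofList run
  let m1 := (PySem.Set.diff (PySem.Set.ofList metadata.keys) rd.keys).foldl
              (fun d k => d.erase k) metadata
  (PySem.Set.inter (PySem.Set.ofList rd.keys) m1.keys).foldl
    (fun d k => if rd.getD k "" ≠ d.getD k "" then d.erase k else d) m1

def common_metadata_py (metadatas : List (List (String × String))) : List (String × String) :=
  match metadatas with
  | [] => []
  | m0 :: rest => (rest.foldl pvAStep (PySem.Dict.ofList m0)).items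

-- ===== PORT B =====
def common_metadata_py_alt (metadatas : List (List (String × String))) : List (String × String) :=
  match metadatas with
  | [] => []
  | m0 :: rest =>
    (PySem.Dict.ofList m0).items.filter
      (fun p => rest.all (fun run => (PySem.Dict.ofList run).get? p.1 == some p.2))

-- ===== PRECONDITION & SPEC =====
def Spec_common_metadata_py (metadatas : List (List (String × String))) (out : List (String × String)) : Prop := out = common_metadata_py_alt metadatas
instance (metadatas : List (List (String × String))) (out : List (String × String)) : Decidable (Spec_common_metadata_py metadatas out) := by unfold Spec_common_metadata_py; infer_instance

-- ===== CLAIM (what is proved, stated in full; the proofs are below) =====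
def Claim_equal_common_metadata_py : Prop := ∀ (metadatas : List (List (String × String))), Dom_common_metadata_py metadatas → Spec_common_metadata_py metadatas (common_metadata_py metadatas)

-- ===== LEMMAS AND PROOFS =====

-- a fold of erase over a list of keys is one filter of the items
theorem pv_foldl_erase (ks : List String) (d : PySem.Dict String String) :
    (ks.foldl (fun d k => d.erase k) d).items
      = d.items.filter (fun p => !(decide (p.1 ∈ ks))) := by
  induction ks generalizing d with
  | nil => simp
  | cons k ks ih =>
    rw [List.foldl_cons, ih]
    simp only [PySem.Dict.erase, List.filter_filter]
    refine List.filter_congr (fun p _ => ?_) |>.symm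
    by_cases h : p.1 = k <;> simp [h]

-- a dict whose items are a filter of a Nodup-keyed dict's items has Nodup keys
theorem pv_nodup_keys_of_items_filter (d e : PySem.Dict String String)
    (hnd : d.keys.Nodup) (f : String × String → Bool)
    (h : e.items = d.items.filter f) : e.keys.Nodup := by
  have hs : ((d.items.filter f).map Prod.fst).Sublist (d.items.map Prod.fst) :=
    List.Sublist.map _ List.filter_sublist
  simpa only [PySem.Dict.keys, h] using hnd.sublist hs

-- the conditional-erase fold: for Nodup keys the condition reads the original values
theorem pv_foldl_cond_erase (rdg : String → String) (ks : List String)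
    (d : PySem.Dict String String) (hnd : d.keys.Nodup) :
    (ks.foldl (fun d k => if rdg k ≠ d.getD k "" then d.erase k else d) d).items
      = d.items.filter (fun p => !(decide (p.1 ∈ ks) && decide (rdg p.1 ≠ p.2))) := by
  induction ks generalizing d with
  | nil => simp
  | cons k ks ih =>
    rw [List.foldl_cons]
    by_cases hc : rdg k ≠ d.getD k ""
    · rw [if_pos hc]
      have hnd' : (d.erase k).keys.Nodup :=
        pv_nodup_keys_of_items_filter d (d.erase k) hnd _ rfl
      rw [ih _ hnd']
      simp only [PySem.Dict.erase, List.filter_filter]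
      refine List.filter_congr (fun p hp => ?_) |>.symm
      obtain ⟨pk, pv⟩ := p
      by_cases h : pk = k
      · subst h
        have hv : d.getD pk "" = pv := PySem.Dict.getD_of_mem_items d hp hnd ""
        have : rdg pk ≠ pv := by rw [← hv]; exact hc
        simp [this]
      · simp [h]
    · rw [if_neg hc, ih _ hnd]
      refine List.filter_congr (fun p hp => ?_)
      obtain ⟨pk, pv⟩ := p
      by_cases h : pk = k
      · subst h
        have hv : d.getD pk "" = pv := PySem.Dict.getD_of_mem_items d hp hnd ""
        have : ¬ rdg pk ≠ pv := by rw [← hv]; exact hc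
        simp [this]
      · simp [h]

-- one iteration of A's outer loop keeps exactly the items run agrees with
theorem pv_aStep_items (d : PySem.Dict String String) (hnd : d.keys.Nodup)
    (run : List (String × String)) :
    (pvAStep d run).items
      = d.items.filter (fun p => (PySem.Dict.ofList run).get? p.1 == some p.2) := by
  unfold pvAStep
  set rd := PySem.Dict.ofList run with hrd
  set m1 := ((PySem.Set.ofList d.keys).diff rd.keys).foldl (fun d k => d.erase k) d with hm1
  have hm1items : m1.items = d.items.filter (fun p => decide (p.1 ∈ rd.keys)) := by
    rw [hm1, pv_foldl_erase]
    refine List.filter_congr (fun p hp => ?_)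
    have hk : p.1 ∈ d.keys := PySem.Dict.mem_keys_of_mem_items d hp
    by_cases h : p.1 ∈ rd.keys
    · simp [PySem.Set.mem_diff, PySem.Set.mem_ofList, h]
    · simp [PySem.Set.mem_diff, PySem.Set.mem_ofList, h, hk]
  have hm1nd : m1.keys.Nodup :=
    pv_nodup_keys_of_items_filter d m1 hnd _ hm1items
  rw [pv_foldl_cond_erase (fun k => rd.getD k "") _ m1 hm1nd, hm1items, List.filter_filter]
  refine List.filter_congr (fun p hp => ?_)
  obtain ⟨pk, pv⟩ := p
  by_cases h : pk ∈ rd.keys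
  · have hmem : pk ∈ m1.keys := by
      refine PySem.Dict.mem_keys_of_mem_items (p := (pk, pv)) m1 ?_
      rw [hm1items]
      simp [List.mem_filter, hp, h]
    rcases ho : rd.get? pk with _ | v
    · exact absurd ((PySem.Dict.get?_eq_none_iff_not_mem_keys rd pk).mp ho) (by simpa using h)
    · have hv : rd.getD pk "" = v := PySem.Dict.getD_of_get?_eq_some rd "" ho
      by_cases hvv : v = pv
      · simp [hv, hvv, PySem.Set.mem_inter, PySem.Set.mem_ofList, h, ← hm1, hmem]
      · simp [hv, hvv, PySem.Set.mem_inter, PySem.Set.mem_ofList, h, ← hm1, hmem]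
  · have ho : rd.get? pk = none :=
      (PySem.Dict.get?_eq_none_iff_not_mem_keys rd pk).mpr (by simpa using h)
    simp [ho, PySem.Set.mem_inter, PySem.Set.mem_ofList, h]

theorem pv_aStep_nodup (d : PySem.Dict String String) (hnd : d.keys.Nodup)
    (run : List (String × String)) : (pvAStep d run).keys.Nodup :=
  pv_nodup_keys_of_items_filter d (pvAStep d run) hnd _ (pv_aStep_items d hnd run)

theorem pv_foldl_aStep (rest : List (List (String × String)))
    (d : PySem.Dict String String) (hnd : d.keys.Nodup) :
    (rest.foldl pvAStep d).items
      = d.items.filter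
          (fun p => rest.all (fun run => (PySem.Dict.ofList run).get? p.1 == some p.2)) := by
  induction rest generalizing d with
  | nil => simp
  | cons run rs ih =>
    rw [List.foldl_cons, ih _ (pv_aStep_nodup d hnd run), pv_aStep_items d hnd run,
      List.filter_filter]
    exact List.filter_congr (fun p _ => by simp [Bool.and_comm])

-- ===== VERDICT (by name: the statement is the Claim_ definition above) =====
theorem common_metadata_py_spec : Claim_equal_common_metadata_py := by
  intro metadatas _
  unfold Spec_common_metadata_py common_metadata_py common_metadata_py_alt
  match metadatas with
  | [] => rfl
  | m0 :: rest =>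
    exact pv_foldl_aStep rest (PySem.Dict.ofList m0) (PySem.Dict.nodup_keys_ofList m0)
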